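-- pv_equiv track=rewrite | github.com/Impavidity/relogic | relogic/logickit/data_io/io_srl.py | expand_predicate
-- ===== SOURCE A (Python) =====
-- def expand_predicate(text, index, predicate_window):
--   span = []
--   for i in range(index-predicate_window, index+predicate_window+1):
--     if i > 0 and i < len(text):
--       span.append(text[i])
--     else:
--       span.append('[MASK]')
--   return " ".join(span)
-- ===== SOURCE B (Python) =====
-- def expand_predicate(text, index, predicate_window):
--     s = index - predicate_window
--     e = index + predicate_window + 1
--     if e <= s:
--         return ""
--     lo = max(s, 1)
--     hi = min(e, len(text))
--     if lo < hi:
--         parts = ['[MASK]'] * (lo - s) + text[lo:hi] + ['[MASK]'] * (e - hi)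
--     else:
--         parts = ['[MASK]'] * (e - s)
--     return " ".join(parts)
-- ===== Notes on version B (the rewrite author's own statement) =====
-- stated objective: alternative
-- what changed: replaces the per-position loop over the window (testing each index and appending token or mask) by computing the valid overlap [lo,hi) once and concatenating leading masks + one contiguous slice text[lo:hi] + trailing masks
import Mathlib
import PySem

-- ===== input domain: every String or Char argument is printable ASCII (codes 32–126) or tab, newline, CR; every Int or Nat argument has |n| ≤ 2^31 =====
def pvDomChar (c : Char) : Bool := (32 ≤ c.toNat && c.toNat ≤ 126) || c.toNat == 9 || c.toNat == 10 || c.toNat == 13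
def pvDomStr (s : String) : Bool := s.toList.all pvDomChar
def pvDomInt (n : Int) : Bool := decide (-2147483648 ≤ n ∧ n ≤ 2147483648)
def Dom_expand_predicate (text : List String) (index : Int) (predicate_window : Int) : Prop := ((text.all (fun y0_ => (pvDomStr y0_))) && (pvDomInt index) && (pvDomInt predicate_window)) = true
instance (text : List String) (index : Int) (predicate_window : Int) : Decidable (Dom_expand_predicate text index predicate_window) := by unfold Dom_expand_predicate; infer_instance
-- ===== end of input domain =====

-- B builds the window as leading masks ++ the contiguous valid slice text[lo:hi] ++ trailing masks
-- instead of A's per-position loop testing each index (alternative decomposition, same cost).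


-- ===== PORT A =====
-- loop over range(index-pw, index+pw+1), appending text[i] (taken only when 0 < i < len) or '[MASK]'
def expand_predicate (text : List String) (index : Int) (predicate_window : Int) : String :=
  let span : List String :=
    (PySem.List.pyRange (index - predicate_window) (index + predicate_window + 1) 1).foldl
      (fun acc i =>
        if 0 < i ∧ i < (text.length : Int) then
          acc ++ [PySem.List.pyGetD text i ""]    -- guard guarantees the index is in range, so the default is never used
        else
          acc ++ ["[MASK]"]) []
  PySem.Str.join " " span

-- ===== PORT B =====
def expand_predicate_alt (text : List String) (index : Int) (predicate_window : Int) : String :=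
  let s := index - predicate_window
  let e := index + predicate_window + 1
  if e ≤ s then "" else
  let lo := max s 1
  let hi := min e (text.length : Int)
  let parts : List String :=
    if lo < hi then
      List.replicate (lo - s).toNat "[MASK]" ++ PySem.List.slice text (some lo) (some hi)
        ++ List.replicate (e - hi).toNat "[MASK]"
    else
      List.replicate (e - s).toNat "[MASK]"
  PySem.Str.join " " parts

-- ===== PRECONDITION & SPEC =====
def Spec_expand_predicate (text : List String) (index : Int) (predicate_window : Int) (out : String) : Prop := out = expand_predicate_alt text index predicate_window
instance (text : List String) (index : Int) (predicate_window : Int) (out : String) : Decidable (Spec_expand_predicate text index predicate_window out) := by unfold Spec_expand_predicate; infer_instance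

-- ===== CLAIM (what is proved, stated in full; the proofs are below) =====
def Claim_equal_expand_predicate : Prop := ∀ (text : List String) (index : Int) (predicate_window : Int), Dom_expand_predicate text index predicate_window → Spec_expand_predicate text index predicate_window (expand_predicate text index predicate_window)

-- ===== LEMMAS AND PROOFS =====

-- a range all of whose elements are masked maps to a block of masks
theorem map_mask_replicate (f : Int → String) (l : List Int)
    (h : ∀ i ∈ l, f i = "[MASK]") :
    l.map f = List.replicate l.length "[MASK]" := by
  induction l with
  | nil => rfl
  | cons a t ih =>
    simp only [List.map_cons, List.length_cons, List.replicate_succ]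
    exact List.cons_eq_cons.mpr ⟨h a (by simp), ih (fun i hi => h i (by simp [hi]))⟩

-- mapping indexed lookup over a range of valid indices is the slice
theorem map_pyGetD_range_slice (text : List String) (lo hi : Int)
    (h0 : 0 ≤ lo) (hle : lo ≤ hi) (hlen : hi ≤ (text.length : Int)) :
    (PySem.List.pyRange lo hi 1).map (fun i => PySem.List.pyGetD text i "")
      = PySem.List.slice text (some lo) (some hi) := by
  rw [PySem.List.slice_toNat text h0 (by omega), PySem.List.pyRange_one]
  apply List.ext_getElem
  · simp
    omega
  · intro k hk1 hk2
    simp only [List.length_map, List.length_range] at hk1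
    simp only [List.getElem_map, List.getElem_range, List.getElem_take, List.getElem_drop]
    rw [PySem.List.pyGetD_eq_getElem text (i := lo + (k : Int)) "" (by omega) (by omega)]
    congr 1
    omega

theorem span_eq (text : List String) (index predicate_window : Int) :
    expand_predicate text index predicate_window = expand_predicate_alt text index predicate_window := by
  unfold expand_predicate expand_predicate_alt
  set s := index - predicate_window with hs
  set e := index + predicate_window + 1 with he
  simp only []
  by_cases hes : e ≤ s
  · rw [if_pos hes, PySem.List.pyRange_one_eq_nil hes]
    rfl
  · rw [if_neg hes]
    have hes' : s < e := by omega
    set lo := max s 1 with hlo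
    set hi := min e (text.length : Int) with hhi
    have hlo1 : (1 : Int) ≤ lo := le_max_right _ _
    have hlos : s ≤ lo := le_max_left _ _
    have hlen1 : hi ≤ (text.length : Int) := min_le_right _ _
    have hhie : hi ≤ e := min_le_left _ _
    set g : Int → String := fun i => if 0 < i ∧ i < (text.length : Int) then PySem.List.pyGetD text i "" else "[MASK]" with hg
    have hfe : (fun (acc : List String) i => if 0 < i ∧ i < (text.length : Int) then acc ++ [PySem.List.pyGetD text i ""] else acc ++ ["[MASK]"]) = fun acc i => acc ++ [g i] := by
      funext acc i
      simp only [hg]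
      split_ifs <;> rfl
    rw [hfe, PySem.List.foldl_append_singleton_eq_map, List.nil_append]
    congr 1
    have hmask : ∀ i : Int, ¬ (0 < i ∧ i < (text.length : Int)) → g i = "[MASK]" := by
      intro i h
      simp only [hg, if_neg h]
    by_cases hwin : lo < hi
    · rw [if_pos hwin]
      have hL : (PySem.List.pyRange s lo 1).map g = List.replicate (lo - s).toNat "[MASK]" := by
        rw [map_mask_replicate g _ (by
          intro i hi'
          rw [PySem.List.mem_pyRange_one] at hi'
          exact hmask i (by omega))]
        rw [PySem.List.length_pyRange_one]
      have hM : (PySem.List.pyRange lo hi 1).map g = PySem.List.slice text (some lo) (some hi) := by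
        rw [← map_pyGetD_range_slice text lo hi (by omega) (le_of_lt hwin) hlen1]
        apply List.map_congr_left
        intro i hi'
        rw [PySem.List.mem_pyRange_one] at hi'
        simp only [hg, if_pos (show 0 < i ∧ i < (text.length : Int) by omega)]
      have hR : (PySem.List.pyRange hi e 1).map g = List.replicate (e - hi).toNat "[MASK]" := by
        rw [map_mask_replicate g _ (by
          intro i hi'
          rw [PySem.List.mem_pyRange_one] at hi'
          obtain ⟨ha, hb⟩ := hi'
          refine hmask i ?_
          rintro ⟨hp, hq⟩
          omega)]
        rw [PySem.List.length_pyRange_one]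
      rw [PySem.List.pyRange_one_append s lo e (by omega) (by omega),
          PySem.List.pyRange_one_append lo hi e (by omega) (by omega),
          List.map_append, List.map_append, hL, hM, hR, ← List.append_assoc]
    · rw [if_neg hwin]
      rw [map_mask_replicate g _ (by
        intro i hi'
        rw [PySem.List.mem_pyRange_one] at hi'
        obtain ⟨ha, hb⟩ := hi'
        refine hmask i ?_
        rintro ⟨hp, hq⟩
        have h1 : lo ≤ i := max_le ha (by omega)
        have h2 : i < hi := lt_min hb hq
        omega)]
      rw [PySem.List.length_pyRange_one]

-- ===== VERDICT (by name: the statement is the Claim_ definition above) =====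
theorem expand_predicate_spec : Claim_equal_expand_predicate := by
  intro text index predicate_window _
  unfold Spec_expand_predicate
  exact span_eq text index predicate_window
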